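/- GENERATED by tools/mkcompositions.py from design/units.gif.tsv (unit `DGifGetWord.COMPOSITION`) — do not edit.
   THE PROOF of the composition unit `DGifGetWord.COMPOSITION`: the 3 segments of `DGifGetWord` chain into its contract, by the theorem
   `Gif.Spec.DGifGetWord.compose` (proved next to the cut assertions). -/
import Gif.Spec.Units.DGifGetWord_COMPOSITION

/-- The segments of `DGifGetWord` compose into its contract. -/
theorem Gif.Spec.Proved.DGifGetWord_COMPOSITION_ok : Gif.Spec.DGifGetWord_COMPOSITION.Statement := by
  intro Lay _hLay μ _hμ u₀ h_DGifGetWord_P h_DGifGetWord_1 h_DGifGetWord_E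
  apply Gif.Spec.DGifGetWord.compose
  all_goals assumption
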